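-- pv_equiv track=rewrite | github.com/Pingviiin/plug | PROJECT/project2/pizza_kiosk.py | count_ingredients
-- ===== SOURCE A (Python) =====
-- def count_ingredients(menu: dict, order: list) -> dict | None:
--     output = {}
--
--     for pizza in order:
--         if pizza not in menu:
--             return {}
--
--         for ingredient in menu[pizza]:
--             if ingredient not in output:
--                 output[ingredient] = 1
--             else:
--                 output[ingredient] += 1
--
--     return output
-- ===== SOURCE B (Python) =====
-- def count_ingredients(menu: dict, order: list) -> dict | None:
--     # Flatten the ordered pizzas' ingredients; a missing pizza raises KeyError -> {}.
--     try:
--         flat = [ing for pizza in order for ing in menu[pizza]]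
--     except KeyError:
--         return {}
--     # Count by distinct-key enumeration: dedup (first-occurrence order), then
--     # compute each key's multiplicity with list.count -- no incremental counter dict.
--     return {ing: flat.count(ing) for ing in dict.fromkeys(flat)}
-- ===== Notes on version B (the rewrite author's own statement) =====
-- stated objective: alternative
-- what changed: A interleaves a membership check with an incremental per-ingredient dict counter and an early return; B flattens all ingredients under a try/except KeyError, deduplicates the flat list preserving first occurrence, and computes each distinct ingredient's count with list.count instead of maintaining any running counter.
import Mathlib
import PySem

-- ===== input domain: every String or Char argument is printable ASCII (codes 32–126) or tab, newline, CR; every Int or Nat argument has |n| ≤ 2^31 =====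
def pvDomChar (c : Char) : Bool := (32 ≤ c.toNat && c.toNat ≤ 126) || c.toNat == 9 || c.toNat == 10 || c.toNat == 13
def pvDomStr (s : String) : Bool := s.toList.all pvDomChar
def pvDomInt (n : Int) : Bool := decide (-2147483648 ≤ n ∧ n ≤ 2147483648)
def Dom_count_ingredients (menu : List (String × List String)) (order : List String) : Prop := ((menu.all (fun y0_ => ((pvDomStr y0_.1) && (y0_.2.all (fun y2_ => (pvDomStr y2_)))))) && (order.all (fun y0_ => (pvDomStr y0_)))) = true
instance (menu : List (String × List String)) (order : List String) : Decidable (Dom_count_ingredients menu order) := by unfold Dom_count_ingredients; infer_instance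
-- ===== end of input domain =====

-- B replaces A's interleaved check-and-increment loop by a flatten (failing on a missing
-- pizza), an ordered dedup and a per-distinct-key list.count — an alternative decomposition.


-- ===== PORT A =====
-- the loop 'for pizza in order' with the early 'return {}' and the interleaved inner counting loop
def countA_go (menu : List (String × List String)) : List String → PySem.Dict String Int → PySem.Dict String Int
  | [], output => output
  | pizza :: rest, output =>
    match (PySem.Dict.mk menu).get? pizza with
    | none => PySem.Dict.empty          -- 'return {}'
    | some ings =>
        countA_go menu rest
          (ings.foldl
            (fun out ing =>
              if out.contains ing = false then out.insert ing 1
              else out.insert ing (out.getD ing 0 + 1))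
            output)

def count_ingredients (menu : List (String × List String)) (order : List String) : List (String × Int) :=
  (countA_go menu order PySem.Dict.empty).items

-- ===== PORT B =====
-- the 'try' comprehension: flatten the ordered pizzas' ingredients, none = KeyError
def flatB? (menu : List (String × List String)) : List String → Option (List String)
  | [] => some []
  | pizza :: rest =>
    match (PySem.Dict.mk menu).get? pizza with
    | none => none
    | some ings => (flatB? menu rest).map (fun tl => ings ++ tl)

def count_ingredients_alt (menu : List (String × List String)) (order : List String) : List (String × Int) :=
  match flatB? menu order with
  | none => []                                         -- 'except KeyError: return {}'
  | some flat =>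
      (PySem.List.dedup flat).map (fun ing => (ing, (flat.count ing : Int)))

-- ===== PRECONDITION & SPEC =====
def Spec_count_ingredients (menu : List (String × List String)) (order : List String) (out : List (String × Int)) : Prop := out = count_ingredients_alt menu order
instance (menu : List (String × List String)) (order : List String) (out : List (String × Int)) : Decidable (Spec_count_ingredients menu order out) := by unfold Spec_count_ingredients; infer_instance

-- ===== CLAIM (what is proved, stated in full; the proofs are below) =====
def Claim_equal_count_ingredients : Prop := ∀ (menu : List (String × List String)) (order : List String), Dom_count_ingredients menu order → Spec_count_ingredients menu order (count_ingredients menu order)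

-- ===== LEMMAS AND PROOFS =====

-- A's inner counting step is the standard counter step: when the key is absent, getD is 0.
theorem stepA_eq_counter_step :
    (fun (out : PySem.Dict String Int) (ing : String) =>
      if out.contains ing = false then out.insert ing 1
      else out.insert ing (out.getD ing 0 + 1)) =
    (fun (d : PySem.Dict String Int) (x : String) => d.insert x (d.getD x 0 + 1)) := by
  funext out ing
  by_cases h : out.contains ing = false
  · have h0 : out.getD ing 0 = 0 := by
      rw [PySem.Dict.getD_of_not_contains]; exact h
    simp [h, h0]
  · simp [h]

-- When the flatten succeeds, A's interleaved loop is the counter fold over the flat list.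
theorem countA_go_of_flat (menu : List (String × List String)) (order : List String)
    (flat : List String) (h : flatB? menu order = some flat) :
    ∀ d, countA_go menu order d =
      flat.foldl (fun d x => d.insert x (d.getD x 0 + 1)) d := by
  induction order generalizing flat with
  | nil =>
    intro d
    simp only [flatB?, Option.some.injEq] at h
    subst h; rfl
  | cons p rest ih =>
    intro d
    simp only [flatB?] at h
    cases hg : (PySem.Dict.mk menu).get? p with
    | none => rw [hg] at h; exact absurd h (by simp)
    | some ings =>
      rw [hg] at h
      cases hr : flatB? menu rest with
      | none => rw [hr] at h; exact absurd h (by simp)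
      | some tl =>
        rw [hr] at h
        simp only [Option.map_some, Option.some.injEq] at h
        subst h
        simp only [countA_go, hg, List.foldl_append]
        rw [stepA_eq_counter_step]
        exact ih tl hr _
-- When the flatten fails (some pizza missing), A hits the early return and yields the empty dict.
theorem countA_go_of_none (menu : List (String × List String)) (order : List String)
    (h : flatB? menu order = none) :
    ∀ d, countA_go menu order d = PySem.Dict.empty := by
  induction order with
  | nil => simp [flatB?] at h
  | cons p rest ih =>
    intro d
    simp only [flatB?] at h
    cases hg : (PySem.Dict.mk menu).get? p with
    | none => simp [countA_go, hg]
    | some ings =>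
      rw [hg] at h
      cases hr : flatB? menu rest with
      | none => simp only [countA_go, hg]; exact ih hr _
      | some tl => rw [hr] at h; exact absurd h (by simp)

-- ===== VERDICT (by name: the statement is the Claim_ definition above) =====
theorem count_ingredients_spec : Claim_equal_count_ingredients := by
  intro menu order _
  unfold Spec_count_ingredients count_ingredients count_ingredients_alt
  cases hf : flatB? menu order with
  | none => rw [countA_go_of_none menu order hf]; rfl
  | some flat =>
    rw [countA_go_of_flat menu order flat hf,
        PySem.Dict.foldl_insert_getD_add_one_eq_counter,
        PySem.Dict.items_counter]
    simp
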